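-- pv_equiv track=rewrite | github.com/Lahaye71714/99-problems | morning_sunshine/solution.py | morning_sunshine
-- ===== SOURCE A (Python) =====
-- def morning_sunshine(numbers):
--         new_list = []
--         j = 0
--
--         if len(numbers) < 2:
--                 return numbers
--         elif len(numbers) > 1:
--                 new_list.append(numbers[len(numbers) -1])
--                 for i in numbers[::-1]:
--                         if i > new_list[j]:
--                                 new_list.append(i)
--                                 j += 1
--                 new_list.reverse()
--
--         return new_list
-- ===== SOURCE B (Python) =====
-- def morning_sunshine(numbers):
--     if len(numbers) < 2:
--         return numbers
--     # right-to-left pass: suffix[i] = running max of elements after i (None at the end)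
--     running = None
--     suffix = []
--     for x in reversed(numbers):
--         suffix.append(running)
--         if running is None or x > running:
--             running = x
--     suffix.reverse()
--     # forward pass: keep the elements strictly above their suffix maximum
--     return [x for x, m in zip(numbers, suffix) if m is None or x > m]
-- ===== Notes on version B (the rewrite author's own statement) =====
-- stated objective: alternative
-- what changed: A does one reverse greedy scan appending elements above the running last-collected value and reverses the result; B instead builds a suffix-maximum table in a right-to-left pass and then filters the list forward, keeping each element strictly greater than the maximum of everything to its right.
import Mathlib
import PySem

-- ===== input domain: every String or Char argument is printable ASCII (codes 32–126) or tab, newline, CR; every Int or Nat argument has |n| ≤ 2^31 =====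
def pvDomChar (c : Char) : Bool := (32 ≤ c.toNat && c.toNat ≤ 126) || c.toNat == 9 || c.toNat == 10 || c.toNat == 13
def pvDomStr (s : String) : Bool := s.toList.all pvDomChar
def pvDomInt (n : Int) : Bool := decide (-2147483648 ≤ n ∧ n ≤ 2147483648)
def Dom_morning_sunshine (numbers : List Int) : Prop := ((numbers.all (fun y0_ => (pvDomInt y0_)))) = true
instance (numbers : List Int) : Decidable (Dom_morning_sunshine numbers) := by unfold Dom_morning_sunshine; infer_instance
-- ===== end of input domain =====

-- B replaces A's single reverse greedy scan by a suffix-maximum table plus a forward filter (alternative decomposition, same cost).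


-- ===== PORT A =====
-- loop body of A: 'if i > new_list[j]: new_list.append(i); j += 1' (the none branch is unreachable: j always indexes the last element)
def msAStep (st : List Int × Int) (i : Int) : List Int × Int :=
  match PySem.List.pyGet? st.1 st.2 with
  | some v => if i > v then (st.1 ++ [i], st.2 + 1) else st
  | none => st

def morning_sunshine (numbers : List Int) : List Int :=
  if numbers.length < 2 then numbers
  else
    -- new_list = [numbers[len(numbers)-1]]  (in range since len ≥ 2)
    let init : List Int :=
      match PySem.List.pyGet? numbers ((numbers.length : Int) - 1) with
      | some v => [v]
      | none => []
    -- for i in numbers[::-1]:  (slice? is never none for step -1)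
    let rev : List Int :=
      match PySem.List.slice? numbers none none (-1) with
      | some r => r
      | none => []
    (rev.foldl msAStep (init, 0)).1.reverse

-- ===== PORT B =====
-- one step of B's reversed pass: record the running maximum seen so far, then update it
def msBStep (x : Int) (st : Option Int × List (Option Int)) : Option Int × List (Option Int) :=
  (match st.1 with
   | none => some x
   | some r => if x > r then some x else some r,
   st.1 :: st.2)

def morning_sunshine_alt (numbers : List Int) : List Int :=
  if numbers.length < 2 then numbers
  else
    let suffix := (numbers.foldr msBStep (none, [])).2
    (numbers.zip suffix).filterMap (fun p =>
      match p.2 with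
      | none => some p.1
      | some m => if p.1 > m then some p.1 else none)

-- ===== PRECONDITION & SPEC =====
def Spec_morning_sunshine (numbers : List Int) (out : List Int) : Prop := out = morning_sunshine_alt numbers
instance (numbers : List Int) (out : List Int) : Decidable (Spec_morning_sunshine numbers out) := by unfold Spec_morning_sunshine; infer_instance

-- ===== CLAIM (what is proved, stated in full; the proofs are below) =====
def Claim_equal_morning_sunshine : Prop := ∀ (numbers : List Int), Dom_morning_sunshine numbers → Spec_morning_sunshine numbers (morning_sunshine numbers)

-- ===== LEMMAS AND PROOFS =====

-- the strictly increasing subsequence A collects along the reversed list, above a running bound m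
def msGather : Int → List Int → List Int
  | _, [] => []
  | m, x :: t => if x > m then x :: msGather x t else msGather m t

-- maximum of a list with seed m
def msMw (m : Int) (l : List Int) : Int := l.foldl max m

-- forward leaders above bound m: keep y iff it exceeds everything after it and the bound
def msL (m : Int) : List Int → List Int
  | [] => []
  | y :: r => if y > msMw m r then y :: msL m r else msL m r

-- B's running maximum and output as named functions
def msMaxOpt (ns : List Int) : Option Int := (ns.foldr msBStep (none, [])).1
def msBOut (ns : List Int) : List Int :=
  (ns.zip (ns.foldr msBStep (none, [])).2).filterMap (fun p =>
    match p.2 with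
    | none => some p.1
    | some m => if p.1 > m then some p.1 else none)

lemma msMw_max_comm (r : List Int) (m x : Int) : msMw (max m x) r = max (msMw m r) x := by
  induction r generalizing m with
  | nil => simp [msMw]
  | cons y r' ih =>
      simp only [msMw, List.foldl_cons] at *
      rw [show max (max m x) y = max (max m y) x by omega, ih]

lemma msMaxOpt_append (r : List Int) (x : Int) : msMaxOpt (r ++ [x]) = some (msMw x r) := by
  induction r with
  | nil => simp [msMaxOpt, msMw, msBStep]
  | cons y r' ih =>
      have ih' : (List.foldr msBStep (none, []) (r' ++ [x])).1 = some (msMw x r') := ih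
      simp only [List.cons_append, msMaxOpt, List.foldr_cons, msBStep, ih']
      have h2 : msMw x (y :: r') = max (msMw x r') y := by
        simpa using msMw_max_comm r' x y
      rw [h2]
      by_cases hy : y > msMw x r'
      · rw [if_pos hy]; exact congrArg some (by omega)
      · rw [if_neg hy]; exact congrArg some (by omega)

lemma msBOut_cons (x : Int) (rest : List Int) :
    msBOut (x :: rest) =
      (match msMaxOpt rest with
       | none => x :: msBOut rest
       | some M => if x > M then x :: msBOut rest else msBOut rest) := by
  cases h : ((rest.foldr msBStep (none, [])).1 : Option Int) with
  | none => simp [msBOut, msMaxOpt, msBStep, h]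
  | some M =>
      simp only [msBOut, msMaxOpt, List.foldr_cons, msBStep, h, List.zip_cons_cons,
        List.filterMap_cons]
      by_cases hx : x > M
      · simp [hx]
      · simp [hx]

lemma msL_append (r : List Int) (x m : Int) :
    msL m (r ++ [x]) = if x > m then msL x r ++ [x] else msL m r := by
  induction r with
  | nil => simp [msL, msMw]
  | cons y r' ih =>
      simp only [List.cons_append, msL] at *
      have hmw : msMw m (r' ++ [x]) = max (msMw m r') x := by
        simp [msMw, List.foldl_append]
      by_cases hx : x > m
      · have hx' : msMw x r' = max (msMw m r') x := by
          have := msMw_max_comm r' m x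
          rw [show max m x = x by omega] at this
          exact this
        simp only [if_pos hx] at ih ⊢
        rw [hmw, ih, ← hx']
        split <;> simp
      · have hle : m ≤ msMw m r' := (PySem.List.le_foldl_max r' m).1
        have hx' : max (msMw m r') x = msMw m r' := by omega
        simp only [if_neg hx] at ih ⊢
        rw [hmw, hx', ih]

lemma msBOut_append (r : List Int) (x : Int) : msBOut (r ++ [x]) = msL x r ++ [x] := by
  induction r with
  | nil => simp [msBOut, msL, msBStep]
  | cons y r' ih =>
      rw [List.cons_append, msBOut_cons, msMaxOpt_append, msL]
      simp only [ih]
      split <;> simp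

lemma msGather_reverse (t : List Int) (m : Int) : (msGather m t).reverse = msL m t.reverse := by
  induction t generalizing m with
  | nil => simp [msGather, msL]
  | cons x t' ih =>
      simp only [msGather, List.reverse_cons, msL_append]
      by_cases hx : x > m
      · simp [hx, ih]
      · simp [hx, ih]

lemma msLoop_fst (r : List Int) (acc : List Int) (v : Int) :
    (r.foldl msAStep (acc ++ [v], (acc.length : Int))).1 = acc ++ [v] ++ msGather v r := by
  induction r generalizing acc v with
  | nil => simp [msGather]
  | cons i r' ih =>
      rw [List.foldl_cons]
      have hget : PySem.List.pyGet? (acc ++ [v]) ((acc.length : Int)) = some v := by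
        rw [PySem.List.pyGet?_natCast]
        simp
      rw [msAStep, hget]
      by_cases hi : i > v
      · simp only [if_pos hi]
        have hlen : (acc.length : Int) + 1 = (((acc ++ [v]).length : Nat) : Int) := by
          simp
        rw [hlen]
        have := ih (acc ++ [v]) i
        rw [show (acc ++ [v]) ++ [i] = acc ++ [v] ++ [i] by simp] at this
        rw [this, msGather, if_pos hi]
        simp
      · simp only [if_neg hi]
        rw [ih acc v, msGather, if_neg hi]

theorem ms_eq (numbers : List Int) : morning_sunshine numbers = morning_sunshine_alt numbers := by
  unfold morning_sunshine morning_sunshine_alt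
  by_cases h : numbers.length < 2
  · simp [h]
  · simp only [if_neg h]
    -- numbers is nonempty: write numbers.reverse = m :: t
    have hne : numbers ≠ [] := by
      intro hnil; rw [hnil] at h; simp at h
    obtain ⟨m, t, hrev⟩ : ∃ m t, numbers.reverse = m :: t := by
      cases hr : numbers.reverse with
      | nil => exact absurd (List.reverse_eq_nil_iff.mp hr) hne
      | cons a b => exact ⟨a, b, rfl⟩
    have hnum : numbers = t.reverse ++ [m] := by
      have := congrArg List.reverse hrev
      simpa using this
    -- the initial element is m
    have hinit : PySem.List.pyGet? numbers ((numbers.length : Int) - 1) = some m := by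
      have hl : ((numbers.length : Int) - 1) = ((numbers.length - 1 : Nat) : Int) := by
        have : 2 ≤ numbers.length := by omega
        omega
      rw [hl, PySem.List.pyGet?_natCast]
      rw [hnum]
      have : (t.reverse ++ [m]).length - 1 = t.reverse.length := by simp
      rw [this]
      simp
    rw [hinit, PySem.List.slice?_none_none_neg_one, hrev]
    -- first loop iteration on m leaves the state unchanged
    have hstep0 : msAStep (([] : List Int) ++ [m], ((List.length ([] : List Int)) : Int)) m
        = (([] : List Int) ++ [m], ((List.length ([] : List Int)) : Int)) := by
      simp [msAStep]
    have hA : ((m :: t).foldl msAStep ([m], 0)).1.reverse = (msGather m t).reverse ++ [m] := by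
      have h0 : ([m], (0 : Int)) = (([] : List Int) ++ [m], ((List.length ([] : List Int)) : Int)) := by simp
      rw [List.foldl_cons, h0, hstep0, msLoop_fst]
      simp
    rw [hA]
    have hB : (numbers.zip (numbers.foldr msBStep (none, [])).2).filterMap (fun p =>
        match p.2 with
        | none => some p.1
        | some mm => if p.1 > mm then some p.1 else none) = msBOut numbers := rfl
    rw [hB, hnum, msBOut_append, ← msGather_reverse]

-- ===== VERDICT (by name: the statement is the Claim_ definition above) =====
theorem morning_sunshine_spec : Claim_equal_morning_sunshine := by
  intro numbers _
  unfold Spec_morning_sunshine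
  exact ms_eq numbers
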